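-- pv_equiv track=rewrite | github.com/anonymous-artifacts/SAGA | saga/datasets/utilities/baseToCSR.py | build_csr
-- ===== SOURCE A (Python) =====
-- from collections import defaultdict
--
-- def build_csr(edges):
--     adj = defaultdict(list)
--     vertices = set()
--
--     for u, v in edges:
--         adj[u].append(v)
--         adj[v].append(u)
--         vertices.add(u)
--         vertices.add(v)
--
--     vertices = sorted(vertices)
--     vid = {v: i for i, v in enumerate(vertices)}
--
--     row_ptr = [0]
--     col_idx = []
--
--     for v in vertices:
--         nbrs = sorted(adj[v])
--         for n in nbrs:
--             col_idx.append(vid[n])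
--         row_ptr.append(len(col_idx))
--
--     return len(vertices), len(edges), row_ptr, col_idx
-- ===== SOURCE B (Python) =====
-- from collections import Counter
--
-- def build_csr(edges):
--     vs = sorted({x for e in edges for x in e})
--     vid = {v: i for i, v in enumerate(vs)}
--     n = len(vs)
--     arcs = []
--     for u, v in edges:
--         iu, iv = vid[u], vid[v]
--         arcs.append(iu * n + iv)
--         arcs.append(iv * n + iu)
--     arcs.sort()
--     col_idx = [a % n for a in arcs]
--     deg = Counter(a // n for a in arcs)
--     row_ptr = [0]
--     for i in range(n):
--         row_ptr.append(row_ptr[-1] + deg[i])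
--     return n, len(edges), row_ptr, col_idx
-- ===== Notes on version B (the rewrite author's own statement) =====
-- stated objective: alternative
-- what changed: Instead of A's defaultdict-of-lists adjacency with a sort of the neighbor list of every vertex, B encodes each undirected edge as two integers row_id*n+col_id, sorts that flat list once, reads col_idx off as a % n and builds row_ptr by a Counter of a // n followed by a running prefix sum.
import Mathlib
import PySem

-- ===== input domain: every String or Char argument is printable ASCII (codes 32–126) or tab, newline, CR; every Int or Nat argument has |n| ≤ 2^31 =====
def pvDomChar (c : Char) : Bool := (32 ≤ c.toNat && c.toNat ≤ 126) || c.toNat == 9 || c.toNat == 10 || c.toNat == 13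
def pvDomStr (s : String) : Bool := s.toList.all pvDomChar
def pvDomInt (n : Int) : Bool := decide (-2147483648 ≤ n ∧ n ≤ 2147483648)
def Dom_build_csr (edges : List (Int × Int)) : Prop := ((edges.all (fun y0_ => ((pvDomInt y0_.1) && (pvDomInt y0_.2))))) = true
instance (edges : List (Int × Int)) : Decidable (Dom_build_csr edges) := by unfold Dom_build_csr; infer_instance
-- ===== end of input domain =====

-- B replaces A's dict-of-lists plus per-vertex sorts by one flat sort of encoded arcs
-- (row_id * n + col_id) and a Counter-based prefix-sum for row_ptr; alternative algorithm,
-- same results (no speed claim).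

-- ===== PORT A =====
def build_csr (edges : List (Int × Int)) : Int × Int × List Int × List Int :=
  let st := edges.foldl
      (fun (st : PySem.Dict Int (List Int) × PySem.Set Int) e =>
        ((st.1.modify e.1 [] (· ++ [e.2])).modify e.2 [] (· ++ [e.1]),
         (st.2.add e.1).add e.2))
      (PySem.Dict.empty, PySem.Set.empty)
  let vertices := PySem.List.sorted st.2 (fun x => x) false
  let vid := (PySem.List.enumerate vertices 0).foldl (fun d p => d.insert p.2 p.1) PySem.Dict.empty
  let rc := vertices.foldl
      (fun (rc : List Int × List Int) v =>
        let nbrs := PySem.List.sorted (st.1.getD v []) (fun x => x) false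
        let col := nbrs.foldl (fun c nb => c ++ [vid.getD nb 0]) rc.2
        (rc.1 ++ [(col.length : Int)], col))
      ([0], [])
  ((vertices.length : Int), (edges.length : Int), rc.1, rc.2)

-- ===== PORT B =====
def build_csr_alt (edges : List (Int × Int)) : Int × Int × List Int × List Int :=
  let vs := PySem.List.sorted (PySem.Set.ofList (edges.flatMap (fun e => [e.1, e.2]))) (fun x => x) false
  let vid := (PySem.List.enumerate vs 0).foldl (fun d p => d.insert p.2 p.1) PySem.Dict.empty
  let n : Int := vs.length
  let arcs := edges.map (fun e => vid.getD e.1 0 * n + vid.getD e.2 0)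
           ++ edges.map (fun e => vid.getD e.2 0 * n + vid.getD e.1 0)
  let arcs := PySem.List.sorted arcs (fun x => x) false
  let col := arcs.map (fun a => PySem.Int.mod a n)
  let deg := PySem.Dict.counter (arcs.map (fun a => PySem.Int.floordiv a n))
  let rp := (PySem.List.pyRange 0 n 1).foldl
      (fun rp i => rp ++ [PySem.List.pyGetD rp (-1) 0 + deg.getD i 0]) [0]
  (n, (edges.length : Int), rp, col)

-- ===== PRECONDITION & SPEC =====
def Spec_build_csr (edges : List (Int × Int)) (out : Int × Int × List Int × List Int) : Prop := out = build_csr_alt edges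
instance (edges : List (Int × Int)) (out : Int × Int × List Int × List Int) : Decidable (Spec_build_csr edges out) := by unfold Spec_build_csr; infer_instance

-- ===== CLAIM (what is proved, stated in full; the proofs are below) =====
def Claim_equal_build_csr : Prop := ∀ (edges : List (Int × Int)), Dom_build_csr edges → Spec_build_csr edges (build_csr edges)

-- ===== LEMMAS AND PROOFS =====

-- canonical views of the shared data
def pvFlat (edges : List (Int × Int)) : List Int := edges.flatMap (fun e => [e.1, e.2])
def pvVs (edges : List (Int × Int)) : List Int :=
  PySem.List.sorted (PySem.Set.ofList (pvFlat edges)) (fun x => x) false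
def pvArcsP (edges : List (Int × Int)) : List (Int × Int) :=
  edges.flatMap (fun e => [(e.1, e.2), (e.2, e.1)])
def pvNbl (edges : List (Int × Int)) (v : Int) : List Int :=
  ((pvArcsP edges).filter (fun p => p.1 == v)).map (fun p => p.2)
def pvVid (edges : List (Int × Int)) (w : Int) : Int := ((pvVs edges).idxOf w : Int)
def pvBlk (edges : List (Int × Int)) (v : Int) : List Int :=
  (PySem.List.sorted (pvNbl edges v) (fun x => x) false).map (pvVid edges)
def pvEnc (edges : List (Int × Int)) (p : Int × Int) : Int :=
  pvVid edges p.1 * ((pvVs edges).length : Int) + pvVid edges p.2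
def pvC (edges : List (Int × Int)) : List Int :=
  (pvVs edges).flatMap (fun v =>
    (PySem.List.sorted (pvNbl edges v) (fun x => x) false).map (fun w => pvEnc edges (v, w)))
def pvScan (g : Int → Int) : List Int → Int → List Int
  | [], _ => []
  | i :: t, acc => (acc + g i) :: pvScan g t (acc + g i)

def pvCanon (edges : List (Int × Int)) : Int × Int × List Int × List Int :=
  (((pvVs edges).length : Int), (edges.length : Int),
   0 :: pvScan (fun v => ((pvBlk edges v).length : Int)) (pvVs edges) 0,
   (pvVs edges).flatMap (pvBlk edges))

-- generic list helpers
lemma pv_flatMap_congr {α β : Type} {l : List α} {f g : α → List β}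
    (h : ∀ a ∈ l, f a = g a) : l.flatMap f = l.flatMap g := by
  induction l with
  | nil => rfl
  | cons x t ih =>
    simp only [List.flatMap_cons]
    rw [h x (by simp), ih (fun a ha => h a (by simp [ha]))]

lemma pv_flatMap_perm {α β : Type} {l : List α} {f g : α → List β}
    (h : ∀ a ∈ l, (f a).Perm (g a)) : (l.flatMap f).Perm (l.flatMap g) := by
  induction l with
  | nil => exact List.Perm.refl _
  | cons x t ih =>
    simp only [List.flatMap_cons]
    exact (h x (by simp)).append (ih (fun a ha => h a (by simp [ha])))

lemma pv_pairwise_flatMap {α β : Type} {R : β → β → Prop} {S : α → α → Prop}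
    {vs : List α} {f : α → List β}
    (hvs : vs.Pairwise S)
    (hin : ∀ v ∈ vs, (f v).Pairwise R)
    (hcross : ∀ v ∈ vs, ∀ w ∈ vs, S v w → ∀ x ∈ f v, ∀ y ∈ f w, R x y) :
    (vs.flatMap f).Pairwise R := by
  induction vs with
  | nil => simp
  | cons v t ih =>
    simp only [List.flatMap_cons]
    rw [List.pairwise_append]
    refine ⟨hin v (by simp), ih hvs.of_cons (fun w hw => hin w (by simp [hw]))
      (fun a ha b hb hab => hcross a (by simp [ha]) b (by simp [hb]) hab), ?_⟩
    intro x hx y hy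
    rcases List.mem_flatMap.mp hy with ⟨w, hw, hyw⟩
    exact hcross v (by simp) w (by simp [hw]) ((List.pairwise_cons.mp hvs).1 w hw) x hx y hyw

lemma pv_group_perm (vs : List Int) : ∀ (l : List (Int × Int)), vs.Nodup →
    (∀ p ∈ l, p.1 ∈ vs) →
    (vs.flatMap (fun v => l.filter (fun p => p.1 == v))).Perm l := by
  induction vs with
  | nil =>
    intro l _ h
    have : l = [] := List.eq_nil_iff_forall_not_mem.mpr (fun p hp => by simpa using h p hp)
    simp [this]
  | cons v t ih =>
    intro l hnd h
    simp only [List.flatMap_cons]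
    have hv : v ∉ t := (List.nodup_cons.mp hnd).1
    have hstep : ∀ w ∈ t, l.filter (fun p => p.1 == w)
        = (l.filter (fun p => !(p.1 == v))).filter (fun p => p.1 == w) := by
      intro w hw
      rw [List.filter_filter]
      refine (List.filter_congr ?_).symm
      intro p _
      by_cases hpw : p.1 = w
      · have hwv : w ≠ v := fun hh => hv (hh ▸ hw)
        simp [hpw, hwv]
      · simp [hpw]
    have hrw : t.flatMap (fun w => l.filter (fun p => p.1 == w))
        = t.flatMap (fun w => (l.filter (fun p => !(p.1 == v))).filter (fun p => p.1 == w)) :=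
      pv_flatMap_congr hstep
    rw [hrw]
    have hperm := ih (l.filter (fun p => !(p.1 == v))) (List.nodup_cons.mp hnd).2 ?_
    · exact (List.Perm.append_left _ hperm).trans (List.filter_append_perm _ l)
    · intro p hp
      have hpl := List.mem_of_mem_filter hp
      have hpv : ¬(p.1 == v) = true := by
        have := List.of_mem_filter hp; simpa using this
      have := h p hpl
      simp only [List.mem_cons] at this
      rcases this with h1 | h1
      · exact absurd (by simp [h1]) hpv
      · exact h1

-- facts about the sorted vertex list
lemma pv_vs_pairwise (edges : List (Int × Int)) : (pvVs edges).Pairwise (· < ·) :=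
  PySem.List.sorted_ofList_pairwise_lt (pvFlat edges)

lemma pv_vs_nodup (edges : List (Int × Int)) : (pvVs edges).Nodup :=
  (pv_vs_pairwise edges).imp (fun h => ne_of_lt h)

lemma pv_mem_vs_of_mem_flat {edges : List (Int × Int)} {x : Int}
    (h : x ∈ pvFlat edges) : x ∈ pvVs edges := by
  unfold pvVs
  rw [PySem.List.mem_sorted]
  exact (PySem.Set.mem_ofList _ x).mpr h

lemma pv_fst_mem_flat {edges : List (Int × Int)} {e : Int × Int} (he : e ∈ edges) :
    e.1 ∈ pvFlat edges := List.mem_flatMap.mpr ⟨e, he, by simp⟩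

lemma pv_snd_mem_flat {edges : List (Int × Int)} {e : Int × Int} (he : e ∈ edges) :
    e.2 ∈ pvFlat edges := List.mem_flatMap.mpr ⟨e, he, by simp⟩

lemma pv_arcsP_mem {edges : List (Int × Int)} {p : Int × Int} (hp : p ∈ pvArcsP edges) :
    p.1 ∈ pvVs edges ∧ p.2 ∈ pvVs edges := by
  rcases List.mem_flatMap.mp hp with ⟨e, he, hpe⟩
  simp only [List.mem_cons] at hpe
  rcases hpe with rfl | rfl | h
  · exact ⟨pv_mem_vs_of_mem_flat (pv_fst_mem_flat he), pv_mem_vs_of_mem_flat (pv_snd_mem_flat he)⟩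
  · exact ⟨pv_mem_vs_of_mem_flat (pv_snd_mem_flat he), pv_mem_vs_of_mem_flat (pv_fst_mem_flat he)⟩
  · cases h

lemma pv_nbl_mem {edges : List (Int × Int)} {v w : Int} (hw : w ∈ pvNbl edges v) :
    w ∈ pvVs edges := by
  rcases List.mem_map.mp hw with ⟨p, hp, rfl⟩
  exact (pv_arcsP_mem (List.mem_of_mem_filter hp)).2

-- idxOf facts on the strictly increasing vertex list
lemma pv_vid_nonneg (edges : List (Int × Int)) (w : Int) : 0 ≤ pvVid edges w := by
  unfold pvVid; positivity

lemma pv_vid_lt_length {edges : List (Int × Int)} {w : Int} (hw : w ∈ pvVs edges) :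
    pvVid edges w < ((pvVs edges).length : Int) := by
  unfold pvVid
  exact_mod_cast List.idxOf_lt_length_of_mem hw

lemma pv_vid_strict {edges : List (Int × Int)} {w w' : Int}
    (hw : w ∈ pvVs edges) (hw' : w' ∈ pvVs edges) (h : w < w') :
    pvVid edges w < pvVid edges w' := by
  unfold pvVid
  have hi := List.idxOf_lt_length_of_mem hw
  have hj := List.idxOf_lt_length_of_mem hw'
  have hgi : (pvVs edges)[(pvVs edges).idxOf w] = w := List.getElem_idxOf hi
  have hgj : (pvVs edges)[(pvVs edges).idxOf w'] = w' := List.getElem_idxOf hj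
  by_contra hc
  rw [not_lt] at hc
  have hc' : (pvVs edges).idxOf w' ≤ (pvVs edges).idxOf w := by exact_mod_cast hc
  rcases lt_or_eq_of_le hc' with hlt | heq
  · have := (List.pairwise_iff_getElem.mp (pv_vs_pairwise edges)) _ _ hj hi hlt
    rw [hgi, hgj] at this
    exact absurd h (not_lt.mpr this.le)
  · simp only [heq] at hgj
    rw [hgi] at hgj
    exact absurd hgj (ne_of_lt h)

lemma pv_vid_mono {edges : List (Int × Int)} {w w' : Int}
    (hw : w ∈ pvVs edges) (hw' : w' ∈ pvVs edges) (h : w ≤ w') :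
    pvVid edges w ≤ pvVid edges w' := by
  rcases lt_or_eq_of_le h with hlt | rfl
  · exact (pv_vid_strict hw hw' hlt).le
  · exact le_refl _

lemma pv_vid_getElem (edges : List (Int × Int)) (k : Nat) (hk : k < (pvVs edges).length) :
    pvVid edges ((pvVs edges)[k]) = (k : Int) := by
  unfold pvVid
  have hmem : (pvVs edges)[k] ∈ pvVs edges := List.getElem_mem hk
  have hi := List.idxOf_lt_length_of_mem hmem
  have hgi : (pvVs edges)[(pvVs edges).idxOf ((pvVs edges)[k])] = (pvVs edges)[k] :=
    List.getElem_idxOf hi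
  have := ((pv_vs_nodup edges).getElem_inj_iff).mp hgi
  exact_mod_cast this

-- the vid dictionary computes pvVid
lemma pv_vid_dict_skip (l : List (Int × Int)) (w : Int) :
    ∀ d : PySem.Dict Int Int, (∀ p ∈ l, p.2 ≠ w) →
    (l.foldl (fun d p => d.insert p.2 p.1) d).getD w 0 = d.getD w 0 := by
  induction l with
  | nil => intro d _; rfl
  | cons p t ih =>
    intro d h
    simp only [List.foldl_cons]
    rw [ih _ (fun q hq => h q (by simp [hq]))]
    have : w ≠ p.2 := fun hh => (h p (by simp)) hh.symm
    simp [pysem, this]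

lemma pv_vid_dict_core (vs : List Int) : ∀ (s : Int) (d : PySem.Dict Int Int) (w : Int),
    vs.Nodup → w ∈ vs →
    ((PySem.List.enumerate vs s).foldl (fun d p => d.insert p.2 p.1) d).getD w 0
      = s + (vs.idxOf w : Int) := by
  induction vs with
  | nil => intro s d w _ hw; cases hw
  | cons v t ih =>
    intro s d w hnd hw
    rw [PySem.List.enumerate_cons]
    simp only [List.foldl_cons]
    by_cases hwv : w = v
    · subst hwv
      rw [pv_vid_dict_skip]
      · simp [pysem, List.idxOf_cons_self]
      · intro p hp
        rcases (PySem.List.mem_enumerate_iff t (s+1) p).mp hp with ⟨k, hk, rfl⟩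
        intro hc
        exact (List.nodup_cons.mp hnd).1 (hc ▸ List.getElem_mem hk)
    · have hwt : w ∈ t := by
        rcases List.mem_cons.mp hw with h | h
        · exact absurd h hwv
        · exact h
      rw [ih (s+1) _ w (List.nodup_cons.mp hnd).2 hwt]
      have : t.idxOf w + 1 = (v :: t).idxOf w := (List.idxOf_cons_ne t (fun h => hwv h.symm)).symm
      push_cast [← this]
      ring

-- A's paired fold over edges = a dict fold over directed arcs and a set fold over endpoints
lemma pv_A_fold (edges : List (Int × Int)) :
    ∀ (d0 : PySem.Dict Int (List Int)) (s0 : PySem.Set Int),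
    edges.foldl
      (fun (st : PySem.Dict Int (List Int) × PySem.Set Int) e =>
        ((st.1.modify e.1 [] (· ++ [e.2])).modify e.2 [] (· ++ [e.1]),
         (st.2.add e.1).add e.2)) (d0, s0)
    = ((pvArcsP edges).foldl (fun d p => d.modify p.1 [] (· ++ [p.2])) d0,
       (pvFlat edges).foldl PySem.Set.add s0) := by
  induction edges with
  | nil => intro d0 s0; rfl
  | cons e t ih =>
    intro d0 s0
    simp only [pvArcsP, pvFlat, List.flatMap_cons, List.cons_append, List.foldl_cons,
      List.nil_append] at *
    rw [ih]

lemma pv_adj_getD (edges : List (Int × Int)) (v : Int) :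
    ((pvArcsP edges).foldl (fun d p => d.modify p.1 [] (· ++ [p.2]))
      (PySem.Dict.empty : PySem.Dict Int (List Int))).getD v [] = pvNbl edges v := by
  rw [PySem.Dict.getD_foldl_modify_append]
  simp [pysem, pvNbl]

lemma pv_vid_getD (edges : List (Int × Int)) {w : Int} (hw : w ∈ pvVs edges) :
    ((PySem.List.enumerate (pvVs edges) 0).foldl (fun d p => d.insert p.2 p.1)
      (PySem.Dict.empty : PySem.Dict Int Int)).getD w 0 = pvVid edges w := by
  rw [pv_vid_dict_core _ 0 _ _ (pv_vs_nodup edges) hw]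
  unfold pvVid
  ring

-- generic scan characterizations
lemma pv_pyGetD_last (xs : List Int) (x : Int) :
    PySem.List.pyGetD (xs ++ [x]) (-1) 0 = x := by
  simp [PySem.List.pyGetD, PySem.List.pyGet?, PySem.List.pyIdx?]

lemma pv_scan_fold (g : Int → Int) (is : List Int) :
    ∀ (rp0 : List Int) (a : Int), PySem.List.pyGetD rp0 (-1) 0 = a →
    is.foldl (fun rp i => rp ++ [PySem.List.pyGetD rp (-1) 0 + g i]) rp0
      = rp0 ++ pvScan g is a := by
  induction is with
  | nil => intro rp0 a _; simp [pvScan]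
  | cons i t ih =>
    intro rp0 a h
    simp only [List.foldl_cons, h]
    rw [ih (rp0 ++ [a + g i]) (a + g i) (pv_pyGetD_last rp0 (a + g i))]
    simp [pvScan, List.append_assoc]

lemma pv_scan_congr (g1 g2 : Int → Int) (is1 : List Int) :
    ∀ (is2 : List Int) (a : Int), is1.map g1 = is2.map g2 →
    pvScan g1 is1 a = pvScan g2 is2 a := by
  induction is1 with
  | nil =>
    intro is2 a h
    have : is2 = [] := by
      cases is2 with
      | nil => rfl
      | cons j t2 => simp at h
    simp [this, pvScan]
  | cons i t1 ih =>
    intro is2 a h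
    cases is2 with
    | nil => simp at h
    | cons j t2 =>
      simp only [List.map_cons, List.cons.injEq] at h
      simp only [pvScan, h.1]
      rw [ih t2 (a + g2 j) h.2]

-- A's row_ptr/col fold in canonical form
lemma pv_rc_fold (edges : List (Int × Int)) (vsl : List Int) :
    ∀ (rp0 c0 : List Int),
    vsl.foldl (fun (rc : List Int × List Int) v =>
        (rc.1 ++ [((rc.2 ++ pvBlk edges v).length : Int)], rc.2 ++ pvBlk edges v)) (rp0, c0)
    = (rp0 ++ pvScan (fun v => ((pvBlk edges v).length : Int)) vsl (c0.length : Int),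
       c0 ++ vsl.flatMap (pvBlk edges)) := by
  induction vsl with
  | nil => intro rp0 c0; simp [pvScan]
  | cons v t ih =>
    intro rp0 c0
    simp only [List.foldl_cons]
    have hlen : (((c0 ++ pvBlk edges v).length : Int))
        = (c0.length : Int) + ((pvBlk edges v).length : Int) := by
      push_cast [List.length_append]; ring
    rw [ih, hlen]
    simp [pvScan, List.append_assoc]

theorem pv_A_canon (edges : List (Int × Int)) : build_csr edges = pvCanon edges := by
  simp only [build_csr]
  rw [pv_A_fold edges PySem.Dict.empty PySem.Set.empty]
  have hvs : PySem.List.sorted ((pvFlat edges).foldl PySem.Set.add PySem.Set.empty)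
      (fun x => x) false = pvVs edges := by
    rfl
  simp only [hvs]
  have hstep : ∀ (rc : List Int × List Int), ∀ v ∈ pvVs edges,
      (rc.1 ++ [(((PySem.List.sorted
            (((pvArcsP edges).foldl (fun d p => d.modify p.1 [] (· ++ [p.2]))
              PySem.Dict.empty).getD v []) (fun x => x) false).foldl
          (fun c nb => c ++ [((PySem.List.enumerate (pvVs edges) 0).foldl
              (fun d p => d.insert p.2 p.1) PySem.Dict.empty).getD nb 0]) rc.2).length : Int)],
       (PySem.List.sorted
            (((pvArcsP edges).foldl (fun d p => d.modify p.1 [] (· ++ [p.2]))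
              PySem.Dict.empty).getD v []) (fun x => x) false).foldl
          (fun c nb => c ++ [((PySem.List.enumerate (pvVs edges) 0).foldl
              (fun d p => d.insert p.2 p.1) PySem.Dict.empty).getD nb 0]) rc.2)
      = (rc.1 ++ [((rc.2 ++ pvBlk edges v).length : Int)], rc.2 ++ pvBlk edges v) := by
    intro rc v _
    rw [pv_adj_getD, PySem.List.foldl_append_singleton_eq_map]
    have hmap : (PySem.List.sorted (pvNbl edges v) (fun x => x) false).map
        (fun nb => ((PySem.List.enumerate (pvVs edges) 0).foldl
          (fun d p => d.insert p.2 p.1) PySem.Dict.empty).getD nb 0) = pvBlk edges v := by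
      unfold pvBlk
      apply List.map_congr_left
      intro nb hnb
      exact pv_vid_getD edges (pv_nbl_mem ((PySem.List.mem_sorted _ _ _ _).mp hnb))
    rw [hmap]
  rw [PySem.List.foldl_congr_mem _ _ _ _ hstep, pv_rc_fold]
  simp [pvCanon]

-- arithmetic of the arc encoding
lemma pv_N_pos {edges : List (Int × Int)} {v : Int} (hv : v ∈ pvVs edges) :
    (0 : Int) < ((pvVs edges).length : Int) := by
  exact_mod_cast List.length_pos_of_mem hv

lemma pv_enc_mod {edges : List (Int × Int)} {v w : Int}
    (hv : v ∈ pvVs edges) (hw : w ∈ pvVs edges) :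
    PySem.Int.mod (pvEnc edges (v, w)) ((pvVs edges).length : Int) = pvVid edges w := by
  rw [PySem.Int.mod_eq_emod_of_pos (pv_N_pos hv)]
  unfold pvEnc
  simp only
  rw [show pvVid edges v * ((pvVs edges).length : Int) + pvVid edges w
      = pvVid edges w + ((pvVs edges).length : Int) * pvVid edges v by ring]
  rw [Int.add_mul_emod_self_left]
  exact Int.emod_eq_of_lt (pv_vid_nonneg _ _) (pv_vid_lt_length hw)

lemma pv_enc_div {edges : List (Int × Int)} {v w : Int}
    (hv : v ∈ pvVs edges) (hw : w ∈ pvVs edges) :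
    PySem.Int.floordiv (pvEnc edges (v, w)) ((pvVs edges).length : Int) = pvVid edges v := by
  rw [PySem.Int.floordiv_eq_ediv_of_pos (pv_N_pos hv)]
  unfold pvEnc
  simp only
  rw [show pvVid edges v * ((pvVs edges).length : Int) + pvVid edges w
      = pvVid edges w + pvVid edges v * ((pvVs edges).length : Int) by ring]
  rw [Int.add_mul_ediv_right _ _ (ne_of_gt (pv_N_pos hv))]
  rw [Int.ediv_eq_zero_of_lt (pv_vid_nonneg _ _) (pv_vid_lt_length hw)]
  ring

-- B's col list equals A's
lemma pv_col (edges : List (Int × Int)) :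
    (pvC edges).map (fun a => PySem.Int.mod a ((pvVs edges).length : Int))
      = (pvVs edges).flatMap (pvBlk edges) := by
  unfold pvC
  rw [List.map_flatMap]
  apply pv_flatMap_congr
  intro v hv
  rw [List.map_map]
  unfold pvBlk
  apply List.map_congr_left
  intro w hw
  exact pv_enc_mod hv (pv_nbl_mem ((PySem.List.mem_sorted _ _ _ _).mp hw))

-- B's row keys (floordivs) as a replicate-flatten over the enumerated vertex list
lemma pv_divs (edges : List (Int × Int)) :
    (pvC edges).map (fun a => PySem.Int.floordiv a ((pvVs edges).length : Int))
      = (PySem.List.enumerate (pvVs edges) 0).flatMap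
          (fun p => List.replicate (pvBlk edges p.2).length p.1) := by
  unfold pvC
  rw [List.map_flatMap]
  have h1 : ∀ v ∈ pvVs edges,
      ((PySem.List.sorted (pvNbl edges v) (fun x => x) false).map
          (fun w => pvEnc edges (v, w))).map
        (fun a => PySem.Int.floordiv a ((pvVs edges).length : Int))
      = List.replicate (pvBlk edges v).length (pvVid edges v) := by
    intro v hv
    rw [List.map_map]
    have : (PySem.List.sorted (pvNbl edges v) (fun x => x) false).map
        ((fun a => PySem.Int.floordiv a ((pvVs edges).length : Int)) ∘ (fun w => pvEnc edges (v, w)))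
        = (PySem.List.sorted (pvNbl edges v) (fun x => x) false).map (fun _ => pvVid edges v) := by
      apply List.map_congr_left
      intro w hw
      exact pv_enc_div hv (pv_nbl_mem ((PySem.List.mem_sorted _ _ _ _).mp hw))
    rw [this, List.map_const']
    unfold pvBlk
    rw [List.length_map]
  rw [pv_flatMap_congr h1]
  conv_lhs => rw [← PySem.List.map_snd_enumerate (pvVs edges) 0]
  rw [List.flatMap_map]
  apply pv_flatMap_congr
  intro p hp
  rcases (PySem.List.mem_enumerate_iff _ _ _).mp hp with ⟨k, hk, rfl⟩
  simp only
  rw [pv_vid_getElem edges k hk]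
  norm_num

-- counting inside a replicate-flatten recovers the block lengths
lemma pv_cnt_enum (lenf : Int → Nat) (vsl : List Int) : ∀ (s : Int),
    (PySem.List.pyRange s (s + (vsl.length : Int)) 1).map
      (fun i => ((((PySem.List.enumerate vsl s).flatMap
          (fun p => List.replicate (lenf p.2) p.1)).count i : Nat) : Int))
    = vsl.map (fun v => ((lenf v : Nat) : Int)) := by
  induction vsl with
  | nil =>
    intro s
    simp only [List.length_nil, Nat.cast_zero, add_zero, List.map_nil]
    simp [PySem.List.pyRange_one_eq_nil (le_refl s)]
  | cons v t ih =>
    intro s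
    rw [PySem.List.enumerate_cons]
    simp only [List.flatMap_cons, List.length_cons]
    have hb : s + (((t.length + 1 : Nat)) : Int) = (s + 1) + (t.length : Int) := by push_cast; ring
    rw [hb, PySem.List.pyRange_one_cons (by omega : s < (s + 1) + (t.length : Int))]
    have hnot : s ∉ (PySem.List.enumerate t (s + 1)).flatMap (fun p => List.replicate (lenf p.2) p.1) := by
      intro hmem
      rcases List.mem_flatMap.mp hmem with ⟨p, hp, hin⟩
      rcases (PySem.List.mem_enumerate_iff _ _ _).mp hp with ⟨k, hk, rfl⟩
      have := (List.eq_of_mem_replicate hin)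
      omega
    rw [List.map_cons]
    congr 1
    · rw [List.count_append, List.count_replicate_self, List.count_eq_zero.mpr hnot]
      simp
    · have hcongr : ∀ i ∈ PySem.List.pyRange (s + 1) ((s + 1) + (t.length : Int)) 1,
          ((((List.replicate (lenf v) s
              ++ (PySem.List.enumerate t (s + 1)).flatMap (fun p => List.replicate (lenf p.2) p.1)).count i : Nat)) : Int)
          = ((((PySem.List.enumerate t (s + 1)).flatMap (fun p => List.replicate (lenf p.2) p.1)).count i : Nat) : Int) := by
        intro i hi
        have his : i ≠ s := by
          have := (PySem.List.mem_pyRange_one).mp hi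
          omega
        rw [List.count_append, List.count_replicate, if_neg (by simpa using Ne.symm his)]
        norm_num
      rw [List.map_congr_left hcongr]
      exact ih (s + 1)

-- the Counter row degrees along 0..n-1 are exactly the block lengths along vs
lemma pv_deg (edges : List (Int × Int)) :
    (PySem.List.pyRange 0 ((pvVs edges).length : Int) 1).map
      (fun i => (PySem.Dict.counter
          ((pvC edges).map (fun a => PySem.Int.floordiv a ((pvVs edges).length : Int)))).getD i 0)
    = (pvVs edges).map (fun v => ((pvBlk edges v).length : Int)) := by
  simp only [PySem.Dict.getD_counter]
  rw [pv_divs]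
  have := pv_cnt_enum (fun v => (pvBlk edges v).length) (pvVs edges) 0
  rw [zero_add] at this
  exact this

-- the canonical arc list is sorted
lemma pv_C_pairwise (edges : List (Int × Int)) : (pvC edges).Pairwise (· ≤ ·) := by
  unfold pvC
  apply pv_pairwise_flatMap (S := fun a b => a < b) (pv_vs_pairwise edges)
  · intro v hv
    rw [List.pairwise_map]
    refine (PySem.List.sorted_pairwise (pvNbl edges v) (fun x => x)).imp_of_mem ?_
    intro a b ha hb hab
    unfold pvEnc
    simp only
    exact add_le_add (le_refl _)
      (pv_vid_mono (pv_nbl_mem ((PySem.List.mem_sorted _ _ _ _).mp ha))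
        (pv_nbl_mem ((PySem.List.mem_sorted _ _ _ _).mp hb)) hab)
  · intro v hv w hw hvw x hx y hy
    rcases List.mem_map.mp hx with ⟨a, ha, rfl⟩
    rcases List.mem_map.mp hy with ⟨b, hb, rfl⟩
    unfold pvEnc
    simp only
    have hN := pv_N_pos hv
    have h1 : pvVid edges v < pvVid edges w := pv_vid_strict hv hw hvw
    have h2 : pvVid edges a < ((pvVs edges).length : Int) :=
      pv_vid_lt_length (pv_nbl_mem ((PySem.List.mem_sorted _ _ _ _).mp ha))
    have h3 : 0 ≤ pvVid edges b := pv_vid_nonneg _ _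
    have h4 : (pvVid edges v + 1) * ((pvVs edges).length : Int)
        ≤ pvVid edges w * ((pvVs edges).length : Int) :=
      mul_le_mul_of_nonneg_right (by omega) (le_of_lt hN)
    nlinarith

-- interleaved directed arcs vs the two concatenated passes of B
lemma pv_arcs_split (f : Int × Int → Int) (l : List (Int × Int)) :
    ((pvArcsP l).map f).Perm
      (l.map (fun e => f (e.1, e.2)) ++ l.map (fun e => f (e.2, e.1))) := by
  induction l with
  | nil => rfl
  | cons e t ih =>
    simp only [pvArcsP, List.flatMap_cons, List.cons_append, List.nil_append, List.map_cons] at *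
    refine List.Perm.cons _ ?_
    exact (List.Perm.cons _ ih).trans List.perm_middle.symm

lemma pv_C_perm (edges : List (Int × Int)) :
    (pvC edges).Perm ((pvArcsP edges).map (pvEnc edges)) := by
  unfold pvC
  have step1 : ((pvVs edges).flatMap (fun v =>
      (PySem.List.sorted (pvNbl edges v) (fun x => x) false).map (fun w => pvEnc edges (v, w)))).Perm
      ((pvVs edges).flatMap (fun v => (pvNbl edges v).map (fun w => pvEnc edges (v, w)))) :=
    pv_flatMap_perm (fun v _ => (PySem.List.sorted_perm (pvNbl edges v) _ _).map _)
  have step2 : (pvVs edges).flatMap (fun v => (pvNbl edges v).map (fun w => pvEnc edges (v, w)))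
      = ((pvVs edges).flatMap (fun v => (pvArcsP edges).filter (fun p => p.1 == v))).map (pvEnc edges) := by
    rw [List.map_flatMap]
    apply pv_flatMap_congr
    intro v _
    unfold pvNbl
    rw [List.map_map]
    apply List.map_congr_left
    intro p hp
    have : p.1 = v := by simpa using List.of_mem_filter hp
    simp only [Function.comp]
    rw [← this]
  have step3 : ((pvVs edges).flatMap (fun v => (pvArcsP edges).filter (fun p => p.1 == v))).Perm
      (pvArcsP edges) :=
    pv_group_perm (pvVs edges) (pvArcsP edges) (pv_vs_nodup edges)
      (fun p hp => (pv_arcsP_mem hp).1)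
  exact (step1.trans (step2 ▸ List.Perm.refl _)).trans (step3.map (pvEnc edges))

lemma pv_sorted_arcs (edges : List (Int × Int)) :
    PySem.List.sorted
      (edges.map (fun e => pvEnc edges (e.1, e.2)) ++ edges.map (fun e => pvEnc edges (e.2, e.1)))
      (fun x => x) false = pvC edges :=
  PySem.List.sorted_id_eq_of_perm_of_pairwise _ _
    ((pv_C_perm edges).trans (pv_arcs_split (pvEnc edges) edges))
    (pv_C_pairwise edges)

theorem pv_B_canon (edges : List (Int × Int)) : build_csr_alt edges = pvCanon edges := by
  simp only [build_csr_alt]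
  rw [show PySem.List.sorted (PySem.Set.ofList (edges.flatMap (fun e => [e.1, e.2])))
      (fun x => x) false = pvVs edges from rfl]
  have harcs : edges.map (fun e =>
        ((PySem.List.enumerate (pvVs edges) 0).foldl (fun d p => d.insert p.2 p.1)
          PySem.Dict.empty).getD e.1 0 * ((pvVs edges).length : Int)
        + ((PySem.List.enumerate (pvVs edges) 0).foldl (fun d p => d.insert p.2 p.1)
          PySem.Dict.empty).getD e.2 0)
      = edges.map (fun e => pvEnc edges (e.1, e.2)) := by
    apply List.map_congr_left
    intro e he
    rw [pv_vid_getD edges (pv_mem_vs_of_mem_flat (pv_fst_mem_flat he)),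
        pv_vid_getD edges (pv_mem_vs_of_mem_flat (pv_snd_mem_flat he))]
    rfl
  have harcs2 : edges.map (fun e =>
        ((PySem.List.enumerate (pvVs edges) 0).foldl (fun d p => d.insert p.2 p.1)
          PySem.Dict.empty).getD e.2 0 * ((pvVs edges).length : Int)
        + ((PySem.List.enumerate (pvVs edges) 0).foldl (fun d p => d.insert p.2 p.1)
          PySem.Dict.empty).getD e.1 0)
      = edges.map (fun e => pvEnc edges (e.2, e.1)) := by
    apply List.map_congr_left
    intro e he
    rw [pv_vid_getD edges (pv_mem_vs_of_mem_flat (pv_fst_mem_flat he)),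
        pv_vid_getD edges (pv_mem_vs_of_mem_flat (pv_snd_mem_flat he))]
    rfl
  rw [harcs, harcs2, pv_sorted_arcs]
  rw [pv_scan_fold _ _ [0] 0 rfl, pv_col]
  rw [pv_scan_congr _ _ _ (pvVs edges) 0 (pv_deg edges)]
  rfl

-- ===== VERDICT (by name: the statement is the Claim_ definition above) =====
theorem build_csr_spec : Claim_equal_build_csr := by
  intro edges _
  unfold Spec_build_csr
  rw [pv_A_canon, pv_B_canon]
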